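-- pv_equiv track=rewrite | github.com/webdoxinfotech/webd | courses/views.py | insert_hyphen_before_first_digit
-- ===== SOURCE A (Python) =====
-- def insert_hyphen_before_first_digit(input_string):
--     if (input_string.find("-") == -1):
--         result = ""
--         digit_found = False
--
--         for char in input_string:
--             if char.isdigit() and not digit_found:
--                 result += '-' + char
--                 digit_found = True
--             else:
--                 result += char
--
--         return result
--     return input_string
-- ===== SOURCE B (Python) =====
-- def insert_hyphen_before_first_digit(input_string):
--     if "-" not in input_string:
--         i = next((i for i, c in enumerate(input_string) if c.isdigit()), None)
--         if i is None:
--             return input_string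
--         return input_string[:i] + "-" + input_string[i:]
--     return input_string
-- ===== Notes on version B (the rewrite author's own statement) =====
-- stated objective: simpler
-- what changed: Instead of rebuilding the string character by character with a digit_found flag, B locates the first digit's index and splices in the hyphen with one slice expression.
import Mathlib
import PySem

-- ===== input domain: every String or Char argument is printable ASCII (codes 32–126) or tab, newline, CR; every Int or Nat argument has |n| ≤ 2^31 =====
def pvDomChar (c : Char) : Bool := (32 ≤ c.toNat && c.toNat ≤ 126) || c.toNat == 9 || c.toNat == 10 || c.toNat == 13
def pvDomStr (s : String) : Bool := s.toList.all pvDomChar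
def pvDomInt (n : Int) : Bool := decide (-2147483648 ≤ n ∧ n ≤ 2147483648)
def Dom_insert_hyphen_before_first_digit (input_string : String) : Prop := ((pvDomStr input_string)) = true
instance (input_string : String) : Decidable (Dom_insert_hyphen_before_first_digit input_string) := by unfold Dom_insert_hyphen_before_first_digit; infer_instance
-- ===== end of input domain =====

-- B replaces A's char-by-char rebuild with a flag by finding the first digit index and splicing the hyphen with one slice (simpler).
-- ===== PORT A =====
def insert_hyphen_before_first_digit (input_string : String) : String :=
  if PySem.Str.find input_string "-" == -1 then
    let st := input_string.toList.foldl
      (fun (st : List Char × Bool) c =>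
        if PySem.Chars.isdigit c && !st.2 then (st.1 ++ ['-', c], true)
        else (st.1 ++ [c], st.2))
      ([], false)
    String.ofList st.1
  else input_string


-- ===== PORT B =====
def insert_hyphen_before_first_digit_alt (input_string : String) : String :=
  if !(PySem.Str.isIn "-" input_string) then
    match input_string.toList.findIdx? PySem.Chars.isdigit with
    | none => input_string
    | some i => String.ofList (input_string.toList.take i ++ '-' :: input_string.toList.drop i)
  else input_string


-- ===== PRECONDITION & SPEC =====
def Spec_insert_hyphen_before_first_digit (input_string : String) (out : String) : Prop := out = insert_hyphen_before_first_digit_alt input_string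
instance (input_string : String) (out : String) : Decidable (Spec_insert_hyphen_before_first_digit input_string out) := by unfold Spec_insert_hyphen_before_first_digit; infer_instance

-- ===== CLAIM (what is proved, stated in full; the proofs are below) =====
def Claim_equal_insert_hyphen_before_first_digit : Prop := ∀ (input_string : String), Dom_insert_hyphen_before_first_digit input_string → Spec_insert_hyphen_before_first_digit input_string (insert_hyphen_before_first_digit input_string)

-- ===== LEMMAS AND PROOFS =====
def pvLoopA (st : List Char × Bool) (c : Char) : List Char × Bool :=
  if PySem.Chars.isdigit c && !st.2 then (st.1 ++ ['-', c], true)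
  else (st.1 ++ [c], st.2)

theorem foldl_pvLoopA_true (cs : List Char) (acc : List Char) :
    cs.foldl pvLoopA (acc, true) = (acc ++ cs, true) := by
  induction cs generalizing acc with
  | nil => simp
  | cons c cs ih => simp [pvLoopA, ih]

theorem foldl_pvLoopA_false (cs : List Char) (acc : List Char) :
    cs.foldl pvLoopA (acc, false) =
      match cs.findIdx? PySem.Chars.isdigit with
      | none => (acc ++ cs, false)
      | some i => (acc ++ cs.take i ++ '-' :: cs.drop i, true) := by
  induction cs generalizing acc with
  | nil => simp
  | cons c cs ih =>
    by_cases hd : PySem.Chars.isdigit c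
    · simp [pvLoopA, hd, List.findIdx?_cons, foldl_pvLoopA_true]
    · simp only [List.foldl_cons, pvLoopA]
      rw [if_neg (by simp [hd])]
      rw [ih]
      simp [List.findIdx?_cons, hd]
      cases cs.findIdx? PySem.Chars.isdigit <;> simp


-- ===== VERDICT (by name: the statement is the Claim_ definition above) =====
theorem insert_hyphen_before_first_digit_spec : Claim_equal_insert_hyphen_before_first_digit := by
  intro s _
  unfold Spec_insert_hyphen_before_first_digit
  unfold insert_hyphen_before_first_digit insert_hyphen_before_first_digit_alt
  have hguard : (PySem.Str.find s "-" == -1) = !(PySem.Str.isIn "-" s) := by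
    rcases h : PySem.Str.isIn "-" s with _ | _
    · have h2 : ¬ ['-'] <:+: s.toList := by
        have := (PySem.Chars.isIn_eq_false_iff (sub := "-".toList) (s := s.toList)).mp (by simpa using h)
        simpa using this
      simp [PySem.Chars.find_eq_neg_one_iff, h2]
    · have h2 : ['-'] <:+: s.toList := by
        have := (PySem.Str.isIn_iff_infix (sub := "-") (s := s)).mp h
        simpa using this
      simp [(PySem.Chars.find_ne_neg_one_iff (s := s.toList) (sub := ['-'])).mpr h2]
  rw [hguard]
  rcases h : PySem.Str.isIn "-" s with _ | _
  · show String.ofList (s.toList.foldl pvLoopA ([], false)).1 = _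
    rw [foldl_pvLoopA_false]
    cases hf : s.toList.findIdx? PySem.Chars.isdigit <;> simp
  · simp
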